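-- pv_equiv track=rewrite | github.com/sharique786/Fully_Homomorphic_Encryption_Project | financial_data_analysis_v3/server/tenseal_wrapper.py | estimate_depth
-- ===== SOURCE A (Python) =====
-- from typing import List, Any, Dict, Optional, Tuple
--
-- def estimate_depth(operation_sequence: List[str]) -> int:
--     """Estimate multiplicative depth required"""
--     depth = 0
--     for op in operation_sequence:
--         if op in ['multiply', 'square']:
--             depth += 1
--         elif op in ['polynomial_degree_3']:
--             depth += 2
--         elif op in ['sigmoid_approx']:
--             depth += 2
--     return depth
-- ===== SOURCE B (Python) =====
-- def estimate_depth(operation_sequence):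
--     """Estimate multiplicative depth required"""
--     weights = {'multiply': 1, 'square': 1, 'polynomial_degree_3': 2, 'sigmoid_approx': 2}
--     counts = {}
--     for op in operation_sequence:
--         counts[op] = counts.get(op, 0) + 1
--     return sum(weights.get(op, 0) * n for op, n in counts.items())
-- ===== Notes on version B (the rewrite author's own statement) =====
-- stated objective: alternative
-- what changed: B tallies the operations into a frequency table first and then combines each distinct operation's count with a weight dictionary, instead of A's per-element if/elif chain accumulating a running depth.
import Mathlib
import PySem

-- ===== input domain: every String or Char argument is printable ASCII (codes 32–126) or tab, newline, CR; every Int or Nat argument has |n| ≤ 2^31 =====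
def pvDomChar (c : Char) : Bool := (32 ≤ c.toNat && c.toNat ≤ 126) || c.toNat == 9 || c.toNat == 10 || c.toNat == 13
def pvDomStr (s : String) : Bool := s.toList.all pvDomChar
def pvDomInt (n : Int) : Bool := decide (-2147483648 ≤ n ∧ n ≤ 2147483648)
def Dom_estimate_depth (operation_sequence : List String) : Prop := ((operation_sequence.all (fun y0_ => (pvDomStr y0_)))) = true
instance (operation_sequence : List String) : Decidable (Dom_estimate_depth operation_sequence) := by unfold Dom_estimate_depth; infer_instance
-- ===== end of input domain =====

-- B tallies the operations into a frequency table first and then weights each DISTINCT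
-- operation's count, instead of A's per-element if/elif running accumulator (objective: alternative).

-- ===== PORT A =====
def estimate_depth (operation_sequence : List String) : Int :=
  operation_sequence.foldl
    (fun depth op =>
      if op ∈ ["multiply", "square"] then depth + 1
      else if op ∈ ["polynomial_degree_3"] then depth + 2
      else if op ∈ ["sigmoid_approx"] then depth + 2
      else depth)
    0

-- ===== PORT B =====
-- weights = {'multiply': 1, 'square': 1, 'polynomial_degree_3': 2, 'sigmoid_approx': 2}
def pvWeights : PySem.Dict String Int :=
  ((((PySem.Dict.empty).insert "multiply" 1).insert "square" 1).insert
      "polynomial_degree_3" 2).insert "sigmoid_approx" 2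

def estimate_depth_alt (operation_sequence : List String) : Int :=
  let counts :=
    operation_sequence.foldl
      (fun d op => d.insert op (d.getD op 0 + 1)) PySem.Dict.empty
  (counts.items.map (fun p => pvWeights.getD p.1 0 * p.2)).sum

-- ===== PRECONDITION & SPEC =====
def Spec_estimate_depth (operation_sequence : List String) (out : Int) : Prop := out = estimate_depth_alt operation_sequence
instance (operation_sequence : List String) (out : Int) : Decidable (Spec_estimate_depth operation_sequence out) := by unfold Spec_estimate_depth; infer_instance

-- ===== CLAIM (what is proved, stated in full; the proofs are below) =====
def Claim_equal_estimate_depth : Prop := ∀ (operation_sequence : List String), Dom_estimate_depth operation_sequence → Spec_estimate_depth operation_sequence (estimate_depth operation_sequence)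

-- ===== LEMMAS AND PROOFS =====

-- A's per-element contribution equals the weight-dict lookup.
theorem pvWeights_step (op : String) :
    pvWeights.getD op 0 =
      (if op ∈ ["multiply", "square"] then (1 : Int)
       else if op ∈ ["polynomial_degree_3"] then 2
       else if op ∈ ["sigmoid_approx"] then 2
       else 0) := by
  simp only [pvWeights, PySem.Dict.getD_insert, PySem.Dict.getD_empty,
    List.mem_cons, List.not_mem_nil, or_false]
  split_ifs <;> simp_all

-- A's fold is just the sum of per-element weights.
theorem estimate_depth_eq_sum (l : List String) :
    estimate_depth l = (l.map (fun op => pvWeights.getD op 0)).sum := by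
  unfold estimate_depth
  suffices h : ∀ (acc : Int),
      l.foldl
        (fun depth op =>
          if op ∈ ["multiply", "square"] then depth + 1
          else if op ∈ ["polynomial_degree_3"] then depth + 2
          else if op ∈ ["sigmoid_approx"] then depth + 2
          else depth) acc
        = acc + (l.map (fun op => pvWeights.getD op 0)).sum by
    simpa using h 0
  induction l with
  | nil => simp
  | cons x xs ih =>
    intro acc
    simp only [List.foldl_cons, List.map_cons, List.sum_cons, ih, pvWeights_step x]
    split_ifs <;> ring

-- Summing f k * count k over the distinct elements equals summing f over the list.
theorem sum_weight_count (f : String → Int) (l : List String) :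
    ((PySem.Set.ofList l).map (fun k => f k * (l.count k : Int))).sum
      = (l.map f).sum := by
  rw [← PySem.List.dedup_eq_ofList]
  rw [← List.sum_toFinset _ (PySem.List.nodup_dedup l)]
  rw [Finset.sum_list_map_count l f]
  apply Finset.sum_congr
  · ext a; simp [List.mem_toFinset]
  · intro x _
    simp [mul_comm]

-- ===== VERDICT (by name: the statement is the Claim_ definition above) =====
theorem estimate_depth_spec : Claim_equal_estimate_depth := by
  intro l _
  unfold Spec_estimate_depth
  show estimate_depth l =
    ((PySem.Dict.counter l).items.map (fun p => pvWeights.getD p.1 0 * p.2)).sum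
  rw [PySem.Dict.items_counter, List.map_map]
  rw [estimate_depth_eq_sum]
  exact (sum_weight_count (fun k => pvWeights.getD k 0) l).symm
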